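-- pv_equiv track=rewrite | github.com/jjudes/nlp-ingredient-tagger | training.py | iobtag
-- ===== SOURCE A (Python) =====
-- def iobtag(labels):
--     """
--     Add IOB tags to the labels to improve prediction
--     B-XXXX Beginning of XXXX label
--     I-XXXX Inside (not beginning) of XXXX label
--     O No label assigned
--     """
--
--     iob = []
--
--     for i in range(len(labels)):
--
--         if labels[i] is None:
--             iob.append("O")
--         elif i == 0 or labels[i]!=labels[i-1]:
--             iob.append("B-"+labels[i])
--         else:
--             iob.append("I-"+labels[i])
--
--     return iob
-- ===== SOURCE B (Python) =====
-- from itertools import groupby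
--
-- def iobtag(labels):
--     """Group-by runs of equal labels: None-run -> 'O's, otherwise one 'B-' plus 'I-'s."""
--     iob = []
--     for key, grp in groupby(labels):
--         n = sum(1 for _ in grp)
--         if key is None:
--             iob.extend(["O"] * n)
--         else:
--             iob.append("B-" + key)
--             iob.extend(["I-" + key] * (n - 1))
--     return iob
-- ===== Notes on version B (the rewrite author's own statement) =====
-- stated objective: idiomatic
-- what changed: Replaces the index loop comparing labels[i] with labels[i-1] by itertools.groupby over maximal runs of equal labels, emitting each run's tags at once.
import Mathlib
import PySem

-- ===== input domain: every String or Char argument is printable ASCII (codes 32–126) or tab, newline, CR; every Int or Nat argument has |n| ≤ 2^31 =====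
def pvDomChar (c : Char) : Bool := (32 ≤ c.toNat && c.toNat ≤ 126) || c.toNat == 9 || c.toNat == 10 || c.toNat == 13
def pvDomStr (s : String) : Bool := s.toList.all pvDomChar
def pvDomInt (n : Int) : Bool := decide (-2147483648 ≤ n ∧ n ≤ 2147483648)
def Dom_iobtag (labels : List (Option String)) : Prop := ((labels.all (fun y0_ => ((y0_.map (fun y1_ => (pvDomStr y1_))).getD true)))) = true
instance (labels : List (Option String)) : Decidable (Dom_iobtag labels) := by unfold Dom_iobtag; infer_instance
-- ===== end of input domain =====

-- B replaces A's index loop (compare labels[i] with labels[i-1]) by grouping the list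
-- into maximal runs of equal labels and emitting each run's tags at once (idiomatic).


-- ===== PORT A =====
-- for i in range(len(labels)): append "O" / "B-"+l / "I-"+l depending on labels[i] and labels[i-1]
def iobtag (labels : List (Option String)) : List String :=
  (List.range labels.length).foldl (fun iob i =>
    match labels.getD i none with
    | none => iob ++ ["O"]
    | some l =>
      if i = 0 ∨ labels.getD i none ≠ labels.getD (i - 1) none then iob ++ ["B-" ++ l]
      else iob ++ ["I-" ++ l]) []

-- ===== PORT B =====
-- groupby: split off the maximal run equal to the head, emit its tags, recurse on the rest
def iobtag_alt : List (Option String) → List String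
  | [] => []
  | x :: xs =>
    let run := xs.takeWhile (· == x)
    let rest := xs.dropWhile (· == x)
    (match x with
     | none => List.replicate (run.length + 1) "O"
     | some k => ("B-" ++ k) :: List.replicate run.length ("I-" ++ k)) ++ iobtag_alt rest
termination_by xs => xs.length
decreasing_by
  simpa using Nat.lt_succ_of_le (List.length_dropWhile_le (· == x) xs)

-- ===== PRECONDITION & SPEC =====
def Spec_iobtag (labels : List (Option String)) (out : List String) : Prop := out = iobtag_alt labels
instance (labels : List (Option String)) (out : List String) : Decidable (Spec_iobtag labels out) := by unfold Spec_iobtag; infer_instance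

-- ===== CLAIM (what is proved, stated in full; the proofs are below) =====
def Claim_equal_iobtag : Prop := ∀ (labels : List (Option String)), Dom_iobtag labels → Spec_iobtag labels (iobtag labels)

-- ===== LEMMAS AND PROOFS =====

/-- The tag of one element given the previous element (`none` = position 0). -/
def gtag (prev : Option (Option String)) (cur : Option String) : String :=
  match cur with
  | none => "O"
  | some l => if prev = none ∨ prev ≠ some cur then "B-" ++ l else "I-" ++ l

/-- Head-recursive reformulation of A's loop, carrying the previous element. -/
def auxA : Option (Option String) → List (Option String) → List String
  | _, [] => []
  | prev, x :: xs => gtag prev x :: auxA (some x) xs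

lemma auxA_eq_map (xs : List (Option String)) (p : Option (Option String)) :
    auxA p xs = (List.range xs.length).map
      (fun i => gtag (if i = 0 then p else some (xs.getD (i - 1) none)) (xs.getD i none)) := by
  induction xs generalizing p with
  | nil => simp [auxA]
  | cons x xs ih =>
    simp only [auxA, List.length_cons, List.range_succ_eq_map, List.map_cons, List.map_map]
    refine congrArg₂ _ (by simp [List.getD]) ?_
    rw [ih (some x)]
    refine List.map_congr_left fun i _ => ?_
    cases i with
    | zero => simp [List.getD]
    | succ j => simp [List.getD]

lemma step_eq (labels : List (Option String)) (m : Nat) (iob : List String) :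
    (match labels.getD m none with
     | none => iob ++ ["O"]
     | some l =>
       if m = 0 ∨ labels.getD m none ≠ labels.getD (m - 1) none then iob ++ ["B-" ++ l]
       else iob ++ ["I-" ++ l])
    = iob ++ [gtag (if m = 0 then none else some (labels.getD (m - 1) none)) (labels.getD m none)] := by
  cases hp0 : labels.getD m none with
  | none => simp [gtag]
  | some l =>
    simp only [List.getD] at hp0 ⊢
    by_cases hm : m = 0
    · simp [gtag, hm]
    · by_cases hp : labels[m - 1]?.getD none = some l
      · simp [gtag, hm, hp]
      · simp [gtag, hm, hp, Ne.symm hp]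

lemma iobtag_foldl (labels : List (Option String)) (n : Nat) (acc : List String) :
    (List.range n).foldl (fun iob i =>
      match labels.getD i none with
      | none => iob ++ ["O"]
      | some l =>
        if i = 0 ∨ labels.getD i none ≠ labels.getD (i - 1) none then iob ++ ["B-" ++ l]
        else iob ++ ["I-" ++ l]) acc
    = acc ++ (List.range n).map
        (fun i => gtag (if i = 0 then none else some (labels.getD (i - 1) none)) (labels.getD i none)) := by
  induction n generalizing acc with
  | zero => simp
  | succ m ih =>
    rw [List.range_succ, List.foldl_append, List.map_append, ih]
    simp only [List.foldl_cons, List.foldl_nil, List.map_cons, List.map_nil]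
    rw [step_eq labels m, List.append_assoc]

lemma iobtag_eq_auxA (labels : List (Option String)) : iobtag labels = auxA none labels := by
  rw [iobtag, iobtag_foldl labels labels.length [], auxA_eq_map]
  simp

/-- A run of elements all equal to `x`, after seeing `x`, yields constant tags. -/
lemma auxA_run (x : Option String) (run rest : List (Option String))
    (h : ∀ y ∈ run, y = x) :
    auxA (some x) (run ++ rest)
      = run.map (fun _ => gtag (some x) x) ++ auxA (some x) rest := by
  induction run with
  | nil => simp
  | cons y t ih =>
    have hy : y = x := h y (by simp)
    simp only [List.cons_append, auxA, hy, List.map_cons, List.cons_append]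
    exact congrArg _ (ih fun z hz => h z (by simp [hz]))

/-- If the list is empty or starts with an element ≠ x, the previous element doesn't matter. -/
lemma auxA_restart (x : Option String) (ys : List (Option String))
    (h : ∀ y, ys.head? = some y → y ≠ x) :
    auxA (some x) ys = auxA none ys := by
  cases ys with
  | nil => rfl
  | cons y t =>
    have hy : y ≠ x := h y rfl
    have hg : gtag (some x) y = gtag none y := by
      cases y with
      | none => rfl
      | some l => simp [gtag, Ne.symm hy]
    simp [auxA, hg]

lemma iobtag_alt_eq_auxA (labels : List (Option String)) : iobtag_alt labels = auxA none labels := by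
  induction hn : labels.length using Nat.strong_induction_on generalizing labels with
  | _ n ih =>
    cases labels with
    | nil => rw [iobtag_alt]; rfl
    | cons x xs =>
      have hsplit : xs.takeWhile (· == x) ++ xs.dropWhile (· == x) = xs :=
        List.takeWhile_append_dropWhile
      have hrun : ∀ y ∈ xs.takeWhile (· == x), y = x := fun y hy => by
        simpa using List.mem_takeWhile_imp hy
      have hrest : ∀ y, (xs.dropWhile (· == x)).head? = some y → y ≠ x := by
        intro y hy
        have := List.head?_dropWhile_not (· == x) xs
        rw [hy] at this
        simpa using this
      have hlen : (xs.dropWhile (· == x)).length < n := by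
        subst hn
        exact Nat.lt_succ_of_le (by simpa using List.length_dropWhile_le (· == x) xs)
      rw [iobtag_alt.eq_def]
      dsimp only
      rw [show auxA none (x :: xs) = gtag none x :: auxA (some x) xs from rfl]
      conv_rhs => rw [← hsplit]
      rw [auxA_run x _ _ hrun, auxA_restart x _ hrest,
          ih _ hlen (xs.dropWhile (· == x)) rfl]
      cases x with
      | none =>
        simp [gtag, List.replicate_succ, List.map_const']
      | some k =>
        simp [gtag, List.map_const']

-- ===== VERDICT (by name: the statement is the Claim_ definition above) =====
theorem iobtag_spec : Claim_equal_iobtag := by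
  intro labels _
  unfold Spec_iobtag
  rw [iobtag_eq_auxA, iobtag_alt_eq_auxA]
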